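-- pv_equiv track=rewrite | github.com/MohamadAbdulwahid/AdventOfCode_2024 | Day2/program.py | safe_2
-- ===== SOURCE A (Python) =====
-- def safe(report):
--     if report != sorted(report) and report != sorted(report)[::-1]:
--         return False
--     for i  in range(len(report)-1):
--         if not 1 <= abs(report[i]-report[i+1]) <= 3:
--             return False
--     return True
--
-- def safe_2(report):
--     if safe(report):
--         return True
--     for i in range(len(report)):
--         temp_report = report[:i] + report[i+1:]
--         if safe(temp_report):
--             return True
--     return False
-- ===== SOURCE B (Python) =====
-- def _chain(xs, j, ok):
--     # all adjacent pairs from index j on satisfy ok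
--     return all(ok(xs[k], xs[k+1]) for k in range(j, len(xs) - 1))
--
-- def _one_del(xs, ok):
--     # scan to the first adjacent pair violating ok, then the only deletions
--     # that can help are the two elements of that pair
--     n = len(xs)
--     i = 0
--     while i + 1 < n and ok(xs[i], xs[i+1]):
--         i += 1
--     if i + 1 >= n:
--         return True
--     del_left = (i == 0 or ok(xs[i-1], xs[i+1])) and _chain(xs, i + 1, ok)
--     del_right = (i + 2 >= n or ok(xs[i], xs[i+2])) and _chain(xs, i + 2, ok)
--     return del_left or del_right
--
-- def safe_2(report):
--     up = lambda a, b: 1 <= b - a <= 3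
--     down = lambda a, b: 1 <= a - b <= 3
--     return _one_del(report, up) or _one_del(report, down)
-- ===== Notes on version B (the rewrite author's own statement) =====
-- stated objective: faster
-- what changed: Replaces the brute-force loop that re-sorts every one-element-deleted copy with a single linear scan per direction: advance to the first adjacent pair breaking the 1..3 step rule and check only the two deletions (left or right element of that pair) that can possibly repair the chain.
import Mathlib
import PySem

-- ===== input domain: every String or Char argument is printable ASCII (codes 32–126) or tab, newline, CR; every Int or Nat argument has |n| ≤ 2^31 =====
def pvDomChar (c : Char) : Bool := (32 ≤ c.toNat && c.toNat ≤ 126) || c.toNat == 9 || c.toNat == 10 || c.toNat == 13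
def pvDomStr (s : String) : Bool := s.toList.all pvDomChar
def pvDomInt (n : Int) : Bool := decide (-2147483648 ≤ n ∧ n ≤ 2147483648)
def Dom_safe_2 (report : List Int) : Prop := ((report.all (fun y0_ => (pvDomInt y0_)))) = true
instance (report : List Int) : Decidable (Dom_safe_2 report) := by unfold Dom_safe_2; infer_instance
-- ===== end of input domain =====

-- B replaces A's brute-force "try every one-element deletion and re-sort" with one
-- linear scan per direction that checks only the two deletions at the first bad pair
-- (objective: faster, asymptotically).

-- ===== PORT A =====

-- the 'for i in range(len(report)-1)' loop of safe, with early return False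
def pvSafeLoop (report : List Int) : List Int → Bool
  | [] => true
  | i :: rest =>
    match PySem.List.pyGet? report i, PySem.List.pyGet? report (i + 1) with
    | some x, some y =>
        if ¬ (1 ≤ (x - y).natAbs ∧ (x - y).natAbs ≤ 3) then false
        else pvSafeLoop report rest
    | _, _ => false   -- IndexError; unreachable: both indices are in range

def pvSafe (report : List Int) : Bool :=
  if report ≠ PySem.List.sorted report (fun x => x) false ∧
      report ≠ (PySem.List.slice? (PySem.List.sorted report (fun x => x) false)
        none none (-1)).getD [] then   -- sorted(report)[::-1]; slice? with step -1 is always some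
    false
  else pvSafeLoop report (PySem.List.pyRange 0 ((report.length : Int) - 1) 1)

-- the 'for i in range(len(report))' loop of safe_2
def pvSafe2Loop (report : List Int) : List Int → Bool
  | [] => false
  | i :: rest =>
    let temp := PySem.List.slice report none (some i) ++ PySem.List.slice report (some (i + 1)) none
    if pvSafe temp then true else pvSafe2Loop report rest

def safe_2 (report : List Int) : Bool :=
  if pvSafe report then true
  else pvSafe2Loop report (PySem.List.pyRange 0 (report.length : Int) 1)

-- ===== PORT B =====

def pvUp (a b : Int) : Bool := decide (1 ≤ b - a ∧ b - a ≤ 3)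
def pvDown (a b : Int) : Bool := decide (1 ≤ a - b ∧ a - b ≤ 3)

-- _chain(xs, j, ok) on the suffix starting at the scan position
def pvChain (ok : Int → Int → Bool) : List Int → Bool
  | a :: b :: t => ok a b && pvChain ok (b :: t)
  | _ => true

-- the while-loop of _one_del after at least one ok step: p = xs[i-1] is the previous
-- element, the argument list is xs[i:]; at the first bad pair try deleting its left
-- element (needs ok p b and the rest chained) or its right element (chain from a on)
def pvTol1 (ok : Int → Int → Bool) (p : Int) : List Int → Bool
  | a :: b :: t =>
      if ok a b then pvTol1 ok a (b :: t)
      else (ok p b && pvChain ok (b :: t)) || pvChain ok (a :: t)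
  | _ => true

-- _one_del itself: the i == 0 case has no previous element
def pvTol0 (ok : Int → Int → Bool) : List Int → Bool
  | a :: b :: t =>
      if ok a b then pvTol1 ok a (b :: t)
      else pvChain ok (b :: t) || pvChain ok (a :: t)
  | _ => true

def safe_2_alt (report : List Int) : Bool :=
  pvTol0 pvUp report || pvTol0 pvDown report

-- ===== PRECONDITION & SPEC =====
def Spec_safe_2 (report : List Int) (out : Bool) : Prop := out = safe_2_alt report
instance (report : List Int) (out : Bool) : Decidable (Spec_safe_2 report out) := by unfold Spec_safe_2; infer_instance

-- ===== CLAIM (what is proved, stated in full; the proofs are below) =====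
def Claim_equal_safe_2 : Prop := ∀ (report : List Int), Dom_safe_2 report → Spec_safe_2 report (safe_2 report)

-- ===== LEMMAS AND PROOFS =====

theorem pvChain_short (ok : Int → Int → Bool) (xs : List Int) (h : xs.length ≤ 1) :
    pvChain ok xs = true := by
  match xs with
  | [] => rfl
  | [a] => rfl
  | a :: b :: t => simp at h

theorem pvChain_cons_cons (ok : Int → Int → Bool) (a b : Int) (t : List Int) :
    pvChain ok (a :: b :: t) = (ok a b && pvChain ok (b :: t)) := rfl

-- pvChain as IsChain
theorem pvChain_iff_isChain (ok : Int → Int → Bool) (xs : List Int) :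
    pvChain ok xs = true ↔ List.IsChain (fun a b => ok a b = true) xs := by
  induction xs with
  | nil => simp [pvChain]
  | cons a t ih =>
    match t with
    | [] => simp [pvChain]
    | b :: t' =>
      rw [pvChain_cons_cons, List.isChain_cons_cons, Bool.and_eq_true, ih]

def pvLe (a b : Int) : Bool := decide (a ≤ b)
def pvGe (a b : Int) : Bool := decide (a ≥ b)
def pvAbsOk (a b : Int) : Bool := decide (1 ≤ (a - b).natAbs ∧ (a - b).natAbs ≤ 3)

-- A's inner loop computes the |diff| ∈ [1,3] chain on the suffix from k
theorem pvSafeLoop_eq_chain (xs : List Int) :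
    ∀ (n k : Nat), xs.length - k ≤ n →
      pvSafeLoop xs (PySem.List.pyRange (k : Int) ((xs.length : Int) - 1) 1)
        = pvChain pvAbsOk (xs.drop k) := by
  intro n
  induction n with
  | zero =>
    intro k hk
    have hk' : xs.length ≤ k := by omega
    rw [PySem.List.pyRange_one_eq_nil (by push_cast; omega)]
    rw [pvChain_short _ _ (by simp; omega)]
    rfl
  | succ n ih =>
    intro k hk
    by_cases hlt : k + 1 < xs.length
    · rw [PySem.List.pyRange_one_cons (by push_cast; omega)]
      have h1 : PySem.List.pyGet? xs (k : Int) = some xs[k] :=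
        PySem.List.pyGet?_ofNat xs k (by omega)
      have h2 : PySem.List.pyGet? xs ((k : Int) + 1) = some xs[k+1] := by
        have : ((k : Int) + 1) = ((k + 1 : Nat) : Int) := by push_cast; ring
        rw [this]
        exact PySem.List.pyGet?_ofNat xs (k + 1) hlt
      have hdrop : xs.drop k = xs[k] :: xs.drop (k + 1) :=
        List.drop_eq_getElem_cons (by omega)
      have hdrop2 : xs.drop (k + 1) = xs[k+1] :: xs.drop (k + 2) :=
        List.drop_eq_getElem_cons (by omega)
      show pvSafeLoop xs ((k : Int) :: PySem.List.pyRange ((k : Int) + 1) ((xs.length : Int) - 1) 1) = _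
      rw [hdrop, hdrop2, pvChain_cons_cons]
      simp only [pvSafeLoop, h1, h2]
      have hcast : ((k : Int) + 1) = ((k + 1 : Nat) : Int) := by push_cast; ring
      rw [hcast, ih (k + 1) (by omega), hdrop2]
      by_cases hok : 1 ≤ (xs[k] - xs[k+1]).natAbs ∧ (xs[k] - xs[k+1]).natAbs ≤ 3
      · simp [pvAbsOk, hok]
      · simp [pvAbsOk, hok]
    · by_cases hk2 : (k : Int) < (xs.length : Int) - 1
      · exfalso; push_cast at hk2; omega
      · rw [PySem.List.pyRange_one_eq_nil (by omega)]
        rw [pvChain_short _ _ (by simp; omega)]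
        rfl

-- sortedness checks of A = adjacent monotone chains
theorem pv_sorted_eq_iff (xs : List Int) :
    xs = PySem.List.sorted xs (fun x => x) false ↔ List.Pairwise (· ≤ ·) xs := by
  constructor
  · intro h
    have := PySem.List.sorted_pairwise (xs := xs) (key := fun x => x)
    rw [← h] at this
    exact this
  · intro h
    exact (PySem.List.sorted_eq_self_of_pairwise xs (fun x => x) h).symm

theorem pv_sorted_rev_eq_iff (xs : List Int) :
    xs = (PySem.List.sorted xs (fun x => x) false).reverse ↔ List.Pairwise (· ≥ ·) xs := by
  constructor
  · intro h
    have hp := PySem.List.sorted_pairwise (xs := xs) (key := fun x => x)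
    have hxr : xs.reverse = PySem.List.sorted xs (fun x => x) false := by
      conv_lhs => rw [h, List.reverse_reverse]
    have hrev : List.Pairwise (fun a b : Int => a ≤ b) xs.reverse := by
      rw [hxr]; exact hp
    exact (List.pairwise_reverse.mp hrev).imp (fun hab => hab)
  · intro h
    have hperm : xs.reverse.Perm xs := List.reverse_perm xs
    have hpair : List.Pairwise (· ≤ ·) xs.reverse := by
      rw [List.pairwise_reverse]; exact h.imp (fun hab => hab)
    have := PySem.List.sorted_id_eq_of_perm_of_pairwise (xs := xs) (ys := xs.reverse) hperm hpair
    rw [this, List.reverse_reverse]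

theorem pv_pairwise_le_iff (xs : List Int) :
    List.Pairwise (· ≤ ·) xs ↔ pvChain pvLe xs = true := by
  rw [pvChain_iff_isChain]
  constructor
  · intro h
    exact (List.isChain_iff_pairwise.mpr h).imp (fun hab => by simpa [pvLe] using hab)
  · intro h
    exact List.isChain_iff_pairwise.mp (h.imp (fun hab => by simpa [pvLe] using hab))

theorem pv_pairwise_ge_iff (xs : List Int) :
    List.Pairwise (· ≥ ·) xs ↔ pvChain pvGe xs = true := by
  rw [pvChain_iff_isChain]
  constructor
  · intro h
    exact (List.isChain_iff_pairwise.mpr h).imp (fun hab => by simpa [pvGe] using hab)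
  · intro h
    exact List.isChain_iff_pairwise.mp (h.imp (fun hab => by simpa [pvGe] using hab))

theorem pvChain_and (ok1 ok2 ok3 : Int → Int → Bool)
    (h : ∀ a b, (ok1 a b && ok2 a b) = ok3 a b) :
    ∀ xs, (pvChain ok1 xs && pvChain ok2 xs) = pvChain ok3 xs := by
  intro xs
  induction xs with
  | nil => rfl
  | cons a t ih =>
    match t with
    | [] => rfl
    | b :: t' =>
      rw [pvChain_cons_cons, pvChain_cons_cons, pvChain_cons_cons, ← h a b, ← ih]
      cases ok1 a b <;> cases ok2 a b <;> cases pvChain ok1 (b :: t') <;>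
        cases pvChain ok2 (b :: t') <;> rfl

theorem pv_up_merge : ∀ xs, (pvChain pvLe xs && pvChain pvAbsOk xs) = pvChain pvUp xs := by
  refine pvChain_and _ _ _ (fun a b => ?_)
  rw [← Bool.coe_iff_coe]
  simp [pvLe, pvAbsOk, pvUp]
  omega

theorem pv_down_merge : ∀ xs, (pvChain pvGe xs && pvChain pvAbsOk xs) = pvChain pvDown xs := by
  refine pvChain_and _ _ _ (fun a b => ?_)
  rw [← Bool.coe_iff_coe]
  simp [pvGe, pvAbsOk, pvDown]
  omega

-- the full characterisation of A's helper safe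
theorem pvSafe_iff (xs : List Int) :
    pvSafe xs = true ↔ (pvChain pvUp xs = true ∨ pvChain pvDown xs = true) := by
  unfold pvSafe
  rw [PySem.List.slice?_none_none_neg_one]
  simp only [Option.getD_some]
  have hloop := pvSafeLoop_eq_chain xs xs.length 0 (by omega)
  simp only [List.drop_zero] at hloop
  have h0 : ((0 : Int)) = ((0 : Nat) : Int) := rfl
  constructor
  · intro h
    split_ifs at h with hcond
    rw [h0, hloop] at h
    rcases not_and_or.mp hcond with hs | hr
    · have hord := (pv_sorted_eq_iff xs).mp (not_not.mp hs)
      left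
      rw [← pv_up_merge xs, Bool.and_eq_true]
      exact ⟨(pv_pairwise_le_iff xs).mp hord, h⟩
    · have hord := (pv_sorted_rev_eq_iff xs).mp (not_not.mp hr)
      right
      rw [← pv_down_merge xs, Bool.and_eq_true]
      exact ⟨(pv_pairwise_ge_iff xs).mp hord, h⟩
  · intro h
    have habs : pvChain pvAbsOk xs = true := by
      rcases h with h | h
      · rw [← pv_up_merge xs, Bool.and_eq_true] at h; exact h.2
      · rw [← pv_down_merge xs, Bool.and_eq_true] at h; exact h.2
    have hsorted : ¬ (xs ≠ PySem.List.sorted xs (fun x => x) false ∧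
        xs ≠ (PySem.List.sorted xs (fun x => x) false).reverse) := by
      rcases h with h | h
      · have hle : pvChain pvLe xs = true := by
          rw [← pv_up_merge xs, Bool.and_eq_true] at h; exact h.1
        intro hc
        exact hc.1 ((pv_sorted_eq_iff xs).mpr ((pv_pairwise_le_iff xs).mpr hle))
      · have hge : pvChain pvGe xs = true := by
          rw [← pv_down_merge xs, Bool.and_eq_true] at h; exact h.1
        intro hc
        exact hc.2 ((pv_sorted_rev_eq_iff xs).mpr ((pv_pairwise_ge_iff xs).mpr hge))
    rw [if_neg hsorted, h0, hloop]
    exact habs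

-- report[:i] + report[i+1:] is eraseIdx
theorem pv_slice_eraseIdx (xs : List Int) (k : Nat) :
    PySem.List.slice xs none (some (k : Int)) ++ PySem.List.slice xs (some ((k : Int) + 1)) none
      = xs.eraseIdx k := by
  have h1 : PySem.List.slice xs none (some (k : Int)) = xs.take k :=
    PySem.List.slice_to_natCast xs k
  have h2 : PySem.List.slice xs (some ((k : Int) + 1)) none = xs.drop (k + 1) := by
    have : ((k : Int) + 1) = ((k + 1 : Nat) : Int) := by push_cast; ring
    rw [this]
    exact PySem.List.slice_from_natCast xs (k + 1)
  rw [h1, h2, List.eraseIdx_eq_take_drop_succ]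

-- A's outer loop is the deletion existential
theorem pvSafe2Loop_iff (xs : List Int) :
    ∀ (n k : Nat), xs.length - k ≤ n →
      (pvSafe2Loop xs (PySem.List.pyRange (k : Int) (xs.length : Int) 1) = true
        ↔ ∃ i : Nat, k ≤ i ∧ i < xs.length ∧ pvSafe (xs.eraseIdx i) = true) := by
  intro n
  induction n with
  | zero =>
    intro k hk
    rw [PySem.List.pyRange_one_eq_nil (by push_cast; omega)]
    simp only [pvSafe2Loop]
    constructor
    · intro h; exact absurd h (by simp)
    · rintro ⟨i, h1, h2, _⟩; omega
  | succ n ih =>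
    intro k hk
    by_cases hlt : k < xs.length
    · rw [PySem.List.pyRange_one_cons (by push_cast; omega)]
      show pvSafe2Loop xs ((k : Int) :: _) = true ↔ _
      simp only [pvSafe2Loop]
      rw [pv_slice_eraseIdx xs k]
      by_cases hsafe : pvSafe (xs.eraseIdx k) = true
      · simp only [hsafe, if_true]
        constructor
        · intro _; exact ⟨k, le_refl k, hlt, hsafe⟩
        · intro _; trivial
      · rw [if_neg (by simpa using hsafe)]
        have : ((k : Int) + 1) = ((k + 1 : Nat) : Int) := by push_cast; ring
        rw [this, ih (k + 1) (by omega)]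
        constructor
        · rintro ⟨i, h1, h2, h3⟩; exact ⟨i, by omega, h2, h3⟩
        · rintro ⟨i, h1, h2, h3⟩
          refine ⟨i, by_contra fun hne => ?_, h2, h3⟩
          have : i = k := by omega
          exact hsafe (this ▸ h3)
    · rw [PySem.List.pyRange_one_eq_nil (by push_cast; omega)]
      simp only [pvSafe2Loop]
      constructor
      · intro h; exact absurd h (by simp)
      · rintro ⟨i, h1, h2, _⟩; omega

-- B side: the one-deletion scan with a previous element
theorem pvTol1_iff (ok : Int → Int → Bool) :
    ∀ (rest : List Int) (a p : Int), ok p a = true →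
      (pvTol1 ok p (a :: rest) = true
        ↔ pvChain ok (a :: rest) = true
          ∨ ∃ i : Nat, i < (a :: rest).length ∧ pvChain ok (p :: (a :: rest).eraseIdx i) = true) := by
  intro rest
  induction rest with
  | nil =>
    intro a p hpa
    simp [pvTol1, pvChain]
  | cons b t ih =>
    intro a p hpa
    by_cases hab : ok a b = true
    · rw [show pvTol1 ok p (a :: b :: t) = pvTol1 ok a (b :: t) by simp [pvTol1, hab]]
      rw [ih b a hab]
      constructor
      · rintro (h | ⟨i, hi, hc⟩)
        · exact Or.inl (by rw [pvChain_cons_cons, hab, h]; rfl)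
        · refine Or.inr ⟨i + 1, by simp at hi ⊢; omega, ?_⟩
          rw [show (a :: b :: t).eraseIdx (i + 1) = a :: (b :: t).eraseIdx i from rfl]
          rw [pvChain_cons_cons, hpa]
          simpa using hc
      · rintro (h | ⟨i, hi, hc⟩)
        · rw [pvChain_cons_cons, Bool.and_eq_true] at h
          exact Or.inl h.2
        · match i with
          | 0 =>
            rw [show (a :: b :: t).eraseIdx 0 = b :: t from rfl, pvChain_cons_cons,
              Bool.and_eq_true] at hc
            exact Or.inl hc.2
          | i + 1 =>
            rw [show (a :: b :: t).eraseIdx (i + 1) = a :: (b :: t).eraseIdx i from rfl,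
              pvChain_cons_cons, Bool.and_eq_true] at hc
            exact Or.inr ⟨i, by simp at hi ⊢; omega, hc.2⟩
    · rw [show pvTol1 ok p (a :: b :: t)
          = ((ok p b && pvChain ok (b :: t)) || pvChain ok (a :: t)) by
            simp [pvTol1, hab]]
      constructor
      · intro h
        rcases Bool.or_eq_true_iff.mp h with h' | h'
        · rw [Bool.and_eq_true] at h'
          refine Or.inr ⟨0, by simp, ?_⟩
          rw [show (a :: b :: t).eraseIdx 0 = b :: t from rfl, pvChain_cons_cons, h'.1, h'.2]
          rfl
        · refine Or.inr ⟨1, by simp, ?_⟩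
          rw [show (a :: b :: t).eraseIdx 1 = a :: t from rfl, pvChain_cons_cons, hpa]
          simpa using h'
      · rintro (h | ⟨i, hi, hc⟩)
        · rw [pvChain_cons_cons, Bool.and_eq_true] at h
          exact absurd h.1 (by simp [hab])
        · match i with
          | 0 =>
            rw [show (a :: b :: t).eraseIdx 0 = b :: t from rfl, pvChain_cons_cons,
              Bool.and_eq_true] at hc
            exact Bool.or_eq_true_iff.mpr (Or.inl (by rw [hc.1, hc.2]; rfl))
          | 1 =>
            rw [show (a :: b :: t).eraseIdx 1 = a :: t from rfl, pvChain_cons_cons,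
              Bool.and_eq_true] at hc
            exact Bool.or_eq_true_iff.mpr (Or.inr hc.2)
          | i + 2 =>
            rw [show (a :: b :: t).eraseIdx (i + 2) = a :: b :: t.eraseIdx i from rfl,
              pvChain_cons_cons, Bool.and_eq_true, pvChain_cons_cons, Bool.and_eq_true] at hc
            exact absurd hc.2.1 (by simp [hab])

theorem pvTol0_iff (ok : Int → Int → Bool) (xs : List Int) :
    pvTol0 ok xs = true
      ↔ pvChain ok xs = true ∨ ∃ i : Nat, i < xs.length ∧ pvChain ok (xs.eraseIdx i) = true := by
  match xs with
  | [] => simp [pvTol0, pvChain]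
  | [a] => simp [pvTol0, pvChain]
  | a :: b :: t =>
    by_cases hab : ok a b = true
    · rw [show pvTol0 ok (a :: b :: t) = pvTol1 ok a (b :: t) by simp [pvTol0, hab]]
      rw [pvTol1_iff ok t b a hab]
      constructor
      · rintro (h | ⟨i, hi, hc⟩)
        · exact Or.inl (by rw [pvChain_cons_cons, hab, h]; rfl)
        · refine Or.inr ⟨i + 1, by simp at hi ⊢; omega, ?_⟩
          rw [show (a :: b :: t).eraseIdx (i + 1) = a :: (b :: t).eraseIdx i from rfl]
          exact hc
      · rintro (h | ⟨i, hi, hc⟩)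
        · rw [pvChain_cons_cons, Bool.and_eq_true] at h
          exact Or.inl h.2
        · match i with
          | 0 =>
            rw [show (a :: b :: t).eraseIdx 0 = b :: t from rfl] at hc
            exact Or.inl hc
          | i + 1 =>
            rw [show (a :: b :: t).eraseIdx (i + 1) = a :: (b :: t).eraseIdx i from rfl] at hc
            exact Or.inr ⟨i, by simp at hi ⊢; omega, hc⟩
    · rw [show pvTol0 ok (a :: b :: t) = (pvChain ok (b :: t) || pvChain ok (a :: t)) by
        simp [pvTol0, hab]]
      constructor
      · intro h
        rcases Bool.or_eq_true_iff.mp h with h' | h'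
        · exact Or.inr ⟨0, by simp, h'⟩
        · exact Or.inr ⟨1, by simp, h'⟩
      · rintro (h | ⟨i, hi, hc⟩)
        · rw [pvChain_cons_cons, Bool.and_eq_true] at h
          exact absurd h.1 (by simp [hab])
        · match i with
          | 0 => exact Bool.or_eq_true_iff.mpr (Or.inl hc)
          | 1 => exact Bool.or_eq_true_iff.mpr (Or.inr hc)
          | i + 2 =>
            rw [show (a :: b :: t).eraseIdx (i + 2) = a :: b :: t.eraseIdx i from rfl,
              pvChain_cons_cons, Bool.and_eq_true] at hc
            exact absurd hc.1 (by simp [hab])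

theorem safe_2_iff (xs : List Int) :
    safe_2 xs = true ↔ pvSafe xs = true ∨ ∃ i : Nat, i < xs.length ∧ pvSafe (xs.eraseIdx i) = true := by
  unfold safe_2
  by_cases h : pvSafe xs = true
  · simp [h]
  · rw [if_neg (by simpa using h)]
    rw [show ((0:Int) = ((0:Nat):Int)) from rfl,
      pvSafe2Loop_iff xs xs.length 0 (by omega)]
    constructor
    · rintro ⟨i, _, h2, h3⟩; exact Or.inr ⟨i, h2, h3⟩
    · rintro (h' | ⟨i, h2, h3⟩)
      · exact absurd h' h
      · exact ⟨i, Nat.zero_le i, h2, h3⟩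

-- ===== VERDICT (by name: the statement is the Claim_ definition above) =====
theorem safe_2_spec : Claim_equal_safe_2 := by
  intro report _
  unfold Spec_safe_2
  rw [← Bool.coe_iff_coe]
  rw [safe_2_iff report]
  unfold safe_2_alt
  rw [Bool.or_eq_true, pvTol0_iff pvUp report, pvTol0_iff pvDown report]
  simp only [pvSafe_iff]
  constructor
  · rintro ((h | h) | ⟨i, hi, (h | h)⟩)
    · exact Or.inl (Or.inl h)
    · exact Or.inr (Or.inl h)
    · exact Or.inl (Or.inr ⟨i, hi, h⟩)
    · exact Or.inr (Or.inr ⟨i, hi, h⟩)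
  · rintro ((h | ⟨i, hi, h⟩) | (h | ⟨i, hi, h⟩))
    · exact Or.inl (Or.inl h)
    · exact Or.inr ⟨i, hi, Or.inl h⟩
    · exact Or.inl (Or.inr h)
    · exact Or.inr ⟨i, hi, Or.inr h⟩
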